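-- pv_equiv track=rewrite | github.com/Durgesh3805/Automatic-TerminologyExtraction | Hybrid_Approch.py | surrounding_words
-- ===== SOURCE A (Python) =====
-- def surrounding_words(phrase, tokens, window=2):
--     words = phrase.split()
--     for i in range(len(tokens) - len(words) + 1):
--         if tokens[i:i+len(words)] == words:
--             start = max(0, i - window)
--             end = min(len(tokens), i + len(words) + window)
--             return tokens[start:i] + tokens[i+len(words):end]
--     return []
-- ===== SOURCE B (Python) =====
-- def surrounding_words(phrase, tokens, window=2):
--     words = phrase.split()
--     m = len(words)
--     if m == 0:
--         i = 0
--     else: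
--         # Shift-And (bitap): simulate the phrase-matching NFA with a bitmask.
--         # bit j of mask <=> words[:j+1] is a suffix of the tokens read so far.
--         masks = {}
--         for j, w in enumerate(words):
--             masks[w] = masks.get(w, 0) | (1 << j)
--         accept = 1 << (m - 1)
--         mask = 0
--         i = None
--         for k, t in enumerate(tokens):
--             mask = ((mask << 1) | 1) & masks.get(t, 0)
--             if mask & accept:
--                 i = k + 1 - m
--                 break
--         if i is None:
--             return []
--     start = max(0, i - window)
--     end = min(len(tokens), i + m + window)
--     return tokens[start:i] + tokens[i + m:end]
-- ===== Notes on version B (the rewrite author's own statement) =====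
-- stated objective: alternative
-- what changed: A compares a fresh token slice against the split phrase at every start position; B runs the Shift-And (bitap) algorithm: per-token bitmasks are precomputed in a dict and one streaming pass updates an NFA-state bitmask, reporting the first position where the accept bit fires.
import Mathlib
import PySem

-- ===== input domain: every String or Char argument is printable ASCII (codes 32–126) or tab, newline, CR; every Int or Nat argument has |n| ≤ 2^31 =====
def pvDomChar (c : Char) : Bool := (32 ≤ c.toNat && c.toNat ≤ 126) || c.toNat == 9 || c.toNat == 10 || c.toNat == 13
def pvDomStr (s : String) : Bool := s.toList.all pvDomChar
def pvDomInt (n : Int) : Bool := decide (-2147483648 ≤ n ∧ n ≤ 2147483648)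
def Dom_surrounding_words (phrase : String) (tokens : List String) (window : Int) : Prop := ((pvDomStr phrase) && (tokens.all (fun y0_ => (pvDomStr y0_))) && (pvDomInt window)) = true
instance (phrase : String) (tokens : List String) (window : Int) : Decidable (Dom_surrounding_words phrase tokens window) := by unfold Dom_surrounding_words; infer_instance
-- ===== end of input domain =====

-- B replaces A's position-by-position slice comparison by the Shift-And (bitap)
-- algorithm: one streaming pass that simulates the phrase-matching NFA in a bitmask,
-- with per-token bitmasks precomputed in a dict (objective: alternative algorithm).

-- ===== PORT A =====
-- A's 'for i in range(len(tokens) - len(words) + 1)' loop with early return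
def swLoopA (tokens words : List String) (window : Int) : List Int → Option (List String)
  | [] => none
  | i :: rest =>
    if PySem.List.slice tokens (some i) (some (i + (words.length : Int))) == words then
      some (PySem.List.slice tokens (some (max 0 (i - window))) (some i) ++
            PySem.List.slice tokens (some (i + (words.length : Int)))
              (some (min ((tokens.length : Int)) (i + (words.length : Int) + window))))
    else swLoopA tokens words window rest

def surrounding_words (phrase : String) (tokens : List String) (window : Int) : List String :=
  match swLoopA tokens (PySem.Str.split₀ phrase) window
      (PySem.List.pyRange 0 ((tokens.length : Int) - ((PySem.Str.split₀ phrase).length : Int) + 1)) with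
  | some r => r
  | none => []

-- ===== PORT B =====
-- 'for j, w in enumerate(words): masks[w] = masks.get(w, 0) | (1 << j)'
def swMasks (words : List String) : PySem.Dict String Nat :=
  (PySem.List.enumerate words).foldl
    (fun d p => d.insert p.2 ((d.getD p.2 0) ||| (1 <<< p.1.toNat))) PySem.Dict.empty

-- 'for k, t in enumerate(tokens): mask = ((mask << 1) | 1) & masks.get(t, 0); if mask & accept: ...'
def swRunB (masks : PySem.Dict String Nat) (accept m : Nat) : List String → Int → Nat → Option Int
  | [], _, _ => none
  | t :: rest, k, mask =>
    let mask' := ((mask <<< 1) ||| 1) &&& masks.getD t 0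
    if mask' &&& accept ≠ 0 then some (k + 1 - (m : Int))
    else swRunB masks accept m rest (k + 1) mask'

-- the shared tail 'start = max(0, i - window); end = min(len(tokens), i + m + window); return ...'
def swTail (tokens : List String) (m : Nat) (window i : Int) : List String :=
  PySem.List.slice tokens (some (max 0 (i - window))) (some i) ++
  PySem.List.slice tokens (some (i + (m : Int)))
    (some (min ((tokens.length : Int)) (i + (m : Int) + window)))

def surrounding_words_alt (phrase : String) (tokens : List String) (window : Int) : List String :=
  let words := PySem.Str.split₀ phrase
  let m := words.length
  if m = 0 then swTail tokens 0 window 0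
  else
    match swRunB (swMasks words) (1 <<< (m - 1)) m tokens 0 0 with
    | none => []
    | some i => swTail tokens m window i

-- ===== PRECONDITION & SPEC =====
def Spec_surrounding_words (phrase : String) (tokens : List String) (window : Int) (out : List String) : Prop := out = surrounding_words_alt phrase tokens window
instance (phrase : String) (tokens : List String) (window : Int) (out : List String) : Decidable (Spec_surrounding_words phrase tokens window out) := by unfold Spec_surrounding_words; infer_instance

-- ===== CLAIM (what is proved, stated in full; the proofs are below) =====
def Claim_equal_surrounding_words : Prop := ∀ (phrase : String) (tokens : List String) (window : Int), Dom_surrounding_words phrase tokens window → Spec_surrounding_words phrase tokens window (surrounding_words phrase tokens window)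

-- ===== LEMMAS AND PROOFS =====

-- A's match test at position j
def swP (tokens words : List String) (j : Int) : Bool :=
  PySem.List.slice tokens (some j) (some (j + (words.length : Int))) == words

-- "words[:l] is a suffix of tokens[:e]" (a match of the first l words ending at e)
def MEb (tokens words : List String) (e l : Nat) : Bool :=
  decide (l ≤ e) && decide (e ≤ tokens.length) &&
    (List.range l).all (fun p => tokens[e - l + p]? == words[p]?)

theorem MEb_iff (tokens words : List String) (e l : Nat) :
    MEb tokens words e l = true ↔
      (l ≤ e ∧ e ≤ tokens.length ∧ ∀ p < l, tokens[e - l + p]? = words[p]?) := by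
  simp [MEb, List.all_eq_true, and_assoc]

-- A's loop is the first-match find? over its index list, mapped through the tail
theorem swLoopA_eq_find (tokens words : List String) (window : Int) (is : List Int) :
    swLoopA tokens words window is
      = (is.find? (swP tokens words)).map (swTail tokens words.length window) := by
  induction is with
  | nil => rfl
  | cons i rest ih =>
    by_cases h : (PySem.List.slice tokens (some i) (some (i + (words.length : Int))) == words) = true
    · rw [List.find?_cons_of_pos (show swP tokens words i = true from h), swLoopA, if_pos h]; rfl
    · rw [List.find?_cons_of_neg (show ¬ swP tokens words i = true from h), swLoopA, if_neg h, ih]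

theorem pv_find?_congr {α : Type} (l : List α) (f g : α → Bool) (h : ∀ x ∈ l, f x = g x) :
    l.find? f = l.find? g := by
  induction l with
  | nil => rfl
  | cons x xs ih =>
    have hx := h x (by simp)
    by_cases hf : f x = true
    · rw [List.find?_cons_of_pos hf, List.find?_cons_of_pos (hx ▸ hf)]
    · rw [List.find?_cons_of_neg hf, List.find?_cons_of_neg (by rw [← hx]; exact hf),
        ih (fun y hy => h y (by simp [hy]))]

-- a slice match at i is exactly a full match ending at i + m
theorem swP_iff_MEb (tokens words : List String) (hm : words.length ≠ 0) (i : Nat) :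
    swP tokens words (i : Int) = true
      ↔ MEb tokens words (i + words.length) words.length = true := by
  unfold swP
  rw [show ((i : Int) + ((words.length : Nat) : Int)) = ((i + words.length : Nat) : Int) from by
      push_cast; ring]
  rw [PySem.List.slice_natCast, beq_iff_eq, MEb_iff,
    show i + words.length - i = words.length from by omega]
  have hsub : i + words.length - words.length = i := by omega
  constructor
  · intro h
    have hlen := congrArg List.length h
    simp [List.length_take, List.length_drop] at hlen
    have hle : i + words.length ≤ tokens.length := by omega
    refine ⟨by omega, hle, ?_⟩
    intro p hp
    have := congrArg (fun l => l[p]?) h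
    simpa [List.getElem?_take, List.getElem?_drop, hp, hsub] using this
  · rintro ⟨-, hle, hidx⟩
    apply List.ext_getElem?
    intro p
    by_cases hp : p < words.length
    · have := hidx p hp
      rw [hsub] at this
      simpa [List.getElem?_take, List.getElem?_drop, hp] using this
    · have h1 : ((tokens.drop i).take words.length)[p]? = none := by
        simp [hp]
      have h2 : words[p]? = none := by
        exact List.getElem?_eq_none (by omega)
      rw [h1, h2]

-- bit j of the precomputed mask for token t says "words[j] == t"
theorem swMasksAux (ws : List String) (s : Nat) (d : PySem.Dict String Nat)
    (t : String) (j : Nat) :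
    (((PySem.List.enumerate ws (s : Int)).foldl
        (fun d p => d.insert p.2 ((d.getD p.2 0) ||| (1 <<< p.1.toNat))) d).getD t 0).testBit j = true
      ↔ ((d.getD t 0).testBit j = true ∨ (s ≤ j ∧ ws[j - s]? = some t)) := by
  induction ws generalizing s d with
  | nil => simp [PySem.List.enumerate]
  | cons w ws ih =>
    rw [PySem.List.enumerate_cons]
    have hc : ((s : Int) + 1) = (((s + 1 : Nat)) : Int) := by push_cast; ring
    rw [List.foldl_cons, hc, ih]
    have hins : ∀ x : String,
        ((d.insert w ((d.getD w 0) ||| (1 <<< ((s : Int)).toNat))).getD x 0)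
          = if x = w then (d.getD w 0) ||| (1 <<< s) else d.getD x 0 := by
      intro x
      rw [PySem.Dict.getD_insert]
      simp
    by_cases hw : t = w
    · subst hw
      rw [show ((d.insert t ((d.getD t 0) ||| (1 <<< ((s : Int)).toNat))).getD t 0)
            = (d.getD t 0) ||| (2 ^ s) from by
          rw [PySem.Dict.getD_insert_self, Nat.one_shiftLeft]; norm_num]
      rw [Nat.testBit_or, Bool.or_eq_true, Nat.testBit_two_pow]
      constructor
      · rintro (h | h)
        · rcases h with h1 | h1
          · exact Or.inl h1
          · have hj : s = j := of_decide_eq_true h1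
            subst hj
            exact Or.inr ⟨le_refl s, by simp⟩
        · exact Or.inr ⟨by omega, by
            have : j - s = (j - (s+1)) + 1 := by omega
            rw [this]; simpa using h.2⟩
      · rintro (h | ⟨hsj, hget⟩)
        · exact Or.inl (Or.inl h)
        · by_cases hj : j = s
          · subst hj; exact Or.inl (Or.inr (by simp))
          · refine Or.inr ⟨by omega, ?_⟩
            have : j - s = (j - (s+1)) + 1 := by omega
            rw [this] at hget
            simpa using hget
    · rw [hins t, if_neg hw]
      constructor
      · rintro (h | h)
        · exact Or.inl h
        · refine Or.inr ⟨by omega, ?_⟩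
          have : j - s = (j - (s+1)) + 1 := by omega
          rw [this]; simpa using h.2
      · rintro (h | ⟨hsj, hget⟩)
        · exact Or.inl h
        · by_cases hj : j = s
          · subst hj
            simp at hget
            exact absurd hget.symm hw
          · refine Or.inr ⟨by omega, ?_⟩
            have : j - s = (j - (s+1)) + 1 := by omega
            rw [this] at hget
            simpa using hget

theorem swMasks_testBit (words : List String) (t : String) (j : Nat) :
    ((swMasks words).getD t 0).testBit j = true ↔ words[j]? = some t := by
  unfold swMasks
  have h0 : ((0 : Int)) = ((0 : Nat) : Int) := rfl
  rw [show PySem.List.enumerate words = PySem.List.enumerate words ((0 : Nat) : Int) from rfl,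
    swMasksAux]
  simp [PySem.Dict.getD_empty]

-- match-end recursion: a match of l+1 words ends at k+1 iff tokens[k] is words[l]
-- and a match of l words ends at k
theorem MEb_succ (tokens words : List String) (k j : Nat) (hk : k < tokens.length) :
    MEb tokens words (k + 1) (j + 1) = true
      ↔ (tokens[k]? = words[j]? ∧ (j = 0 ∨ MEb tokens words k j = true)) := by
  rw [MEb_iff]
  constructor
  · rintro ⟨h1, h2, h3⟩
    have hjk : j ≤ k := by omega
    have hsub : k + 1 - (j + 1) = k - j := by omega
    constructor
    · have := h3 j (by omega)
      rw [hsub] at this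
      rwa [show k - j + j = k from by omega] at this
    · rcases Nat.eq_zero_or_pos j with hj | hj
      · exact Or.inl hj
      · refine Or.inr ((MEb_iff tokens words k j).mpr ⟨hjk, by omega, ?_⟩)
        intro p hp
        have := h3 p (by omega)
        rwa [hsub] at this
  · rintro ⟨heq, hor⟩
    rcases hor with hj | hme
    · subst hj
      refine ⟨by omega, by omega, ?_⟩
      intro p hp
      interval_cases p
      simpa using heq
    · rw [MEb_iff] at hme
      obtain ⟨hjk, -, h3⟩ := hme
      refine ⟨by omega, by omega, ?_⟩
      intro p hp
      have hsub : k + 1 - (j + 1) = k - j := by omega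
      rw [hsub]
      rcases Nat.lt_or_ge p j with hpj | hpj
      · exact h3 p hpj
      · have hpj' : p = j := by omega
        subst hpj'
        rwa [show k - p + p = k from by omega]

-- the loop invariant: bit j of mask <=> words[:j+1] is a suffix of tokens[:k]
def swInv (tokens words : List String) (k : Nat) (mask : Nat) : Prop :=
  ∀ j, mask.testBit j = true ↔ (j < words.length ∧ MEb tokens words k (j + 1) = true)

theorem swInv_zero (tokens words : List String) : swInv tokens words 0 0 := by
  intro j
  simp [MEb_iff]

theorem swInv_step (tokens words : List String) (k : Nat) (t : String) (mask : Nat)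
    (hk : tokens[k]? = some t) (hInv : swInv tokens words k mask) :
    swInv tokens words (k + 1) (((mask <<< 1) ||| 1) &&& (swMasks words).getD t 0) := by
  have hkn : k < tokens.length := by
    rcases List.getElem?_eq_some_iff.mp hk with ⟨h, -⟩
    exact h
  intro j
  rw [Nat.testBit_and, Bool.and_eq_true, Nat.testBit_or, Nat.testBit_shiftLeft,
    show (1 : Nat) = 2 ^ 0 from rfl, Nat.testBit_two_pow, swMasks_testBit]
  cases j with
  | zero =>
    simp only [Nat.le_zero]
    constructor
    · rintro ⟨-, hw⟩
      have hjm : 0 < words.length := by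
        rcases List.getElem?_eq_some_iff.mp hw with ⟨h, -⟩; exact h
      refine ⟨hjm, (MEb_succ tokens words k 0 hkn).mpr ⟨?_, Or.inl rfl⟩⟩
      rw [hk, hw]
    · rintro ⟨hjm, hme⟩
      have := (MEb_succ tokens words k 0 hkn).mp hme
      refine ⟨by simp, ?_⟩
      rw [← this.1, hk]
  | succ i =>
    constructor
    · rintro ⟨hsh, hw⟩
      have hib : mask.testBit i = true := by
        rw [Bool.or_eq_true] at hsh
        rcases hsh with h | h
        · simpa using h
        · exact absurd (of_decide_eq_true h) (by omega)
      obtain ⟨him, hme⟩ := (hInv i).mp hib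
      have hjm : i + 1 < words.length ∨ i + 1 = words.length := by
        rcases List.getElem?_eq_some_iff.mp hw with ⟨h, -⟩; omega
      refine ⟨by rcases List.getElem?_eq_some_iff.mp hw with ⟨h, -⟩; omega, ?_⟩
      exact (MEb_succ tokens words k (i+1) hkn).mpr ⟨by rw [hk, hw], Or.inr hme⟩
    · rintro ⟨hjm, hme⟩
      obtain ⟨heq, hor⟩ := (MEb_succ tokens words k (i+1) hkn).mp hme
      rcases hor with h | hme'
      · omega
      · refine ⟨?_, by rw [← heq, hk]⟩
        rw [Bool.or_eq_true]
        exact Or.inl (by simpa using (hInv i).mpr ⟨by omega, hme'⟩)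

-- the accept test reads bit m-1
theorem and_accept_ne_zero (x m : Nat) :
    (x &&& (1 <<< (m - 1)) ≠ 0) ↔ x.testBit (m - 1) = true := by
  rw [Nat.one_shiftLeft, Nat.and_two_pow]
  cases h : x.testBit (m - 1)
  · simp
  · simp [(Nat.two_pow_pos (m - 1)).ne']

-- the runner finds the first match end, shifted back to its start index
theorem swRunB_eq (tokens words : List String) (hm : words.length ≠ 0) :
    ∀ (rest : List String) (k : Nat) (mask : Nat),
      tokens.drop k = rest → swInv tokens words k mask →
      swRunB (swMasks words) (1 <<< (words.length - 1)) words.length rest (k : Int) mask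
        = ((List.range' k (tokens.length - k)).find?
            (fun e => MEb tokens words (e + 1) words.length)).map
            (fun e : Nat => ((e : Int) + 1 - (words.length : Int))) := by
  intro rest
  induction rest with
  | nil =>
    intro k mask hdrop _
    have hnk : tokens.length ≤ k := List.drop_eq_nil_iff.mp hdrop
    rw [show tokens.length - k = 0 from by omega]
    rfl
  | cons t rest' ih =>
    intro k mask hdrop hInv
    have hk : tokens[k]? = some t := by
      have : (tokens.drop k)[0]? = some t := by rw [hdrop]; rfl
      rwa [List.getElem?_drop, Nat.add_zero] at this
    have hkn : k < tokens.length := by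
      rcases List.getElem?_eq_some_iff.mp hk with ⟨h, -⟩; exact h
    have hdrop' : tokens.drop (k + 1) = rest' := by
      have : (tokens.drop k).drop 1 = tokens.drop (k + 1) := by
        rw [List.drop_drop]
      rw [← this, hdrop]
      rfl
    have hInv' := swInv_step tokens words k t mask hk hInv
    rw [show tokens.length - k = (tokens.length - (k+1)) + 1 from by omega, List.range'_succ]
    rw [swRunB]
    set mask' := ((mask <<< 1) ||| 1) &&& (swMasks words).getD t 0 with hmask'
    have hcond : (mask' &&& (1 <<< (words.length - 1)) ≠ 0)
        ↔ MEb tokens words (k + 1) words.length = true := by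
      rw [and_accept_ne_zero]
      rw [hInv' (words.length - 1)]
      rw [show words.length - 1 + 1 = words.length from by omega]
      constructor
      · exact fun h => h.2
      · exact fun h => ⟨by omega, h⟩
    by_cases hc : MEb tokens words (k + 1) words.length = true
    · rw [if_pos (hcond.mpr hc), List.find?_cons_of_pos (by simpa using hc)]
      rfl
    · rw [if_neg (fun h => hc (hcond.mp h)),
        List.find?_cons_of_neg (by simpa using hc)]
      have hc1 : ((k : Int) + 1) = (((k + 1 : Nat)) : Int) := by push_cast; ring
      rw [hc1, ih (k + 1) mask' hdrop' hInv', show k + 1 * 1 = k + 1 from by omega]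

-- A's find? over range(n-m+1) equals B's runner
theorem pv_bool_eq_of_iff {b c : Bool} (h : b = true ↔ c = true) : b = c := by
  cases b <;> cases c <;> simp_all

theorem findA_eq_run (tokens words : List String) (hm : words.length ≠ 0) :
    (PySem.List.pyRange 0 ((tokens.length : Int) - (words.length : Int) + 1)).find?
        (swP tokens words)
      = swRunB (swMasks words) (1 <<< (words.length - 1)) words.length tokens 0 0 := by
  have hrun := swRunB_eq tokens words hm tokens 0 0 rfl (swInv_zero tokens words)
  simp only [Nat.cast_zero] at hrun
  rw [hrun, Nat.sub_zero]
  by_cases hmn : words.length ≤ tokens.length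
  · -- left side: range(n-m+1) as a Nat range mapped through the cast
    have hcast : ((tokens.length : Int) - (words.length : Int) + 1 - 0).toNat
        = tokens.length - words.length + 1 := by omega
    rw [PySem.List.pyRange_one, hcast]
    rw [show (fun k : Nat => (0 : Int) + (k : Int)) = (fun k : Nat => (k : Int)) from by
      funext k; ring]
    rw [List.find?_map]
    -- right side: split range' 0 n at m-1; no match can end before m
    have hsplit : List.range' 0 tokens.length
        = List.range' 0 (words.length - 1) ++
          List.range' (words.length - 1) (tokens.length - words.length + 1) := by
      rw [show List.range' (words.length - 1) (tokens.length - words.length + 1)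
            = List.range' (0 + (words.length - 1)) (tokens.length - words.length + 1) from by
          rw [Nat.zero_add],
        List.range'_append_1]
      congr 1
      omega
    rw [hsplit, List.find?_append]
    have hfirst : (List.range' 0 (words.length - 1)).find?
        (fun e => MEb tokens words (e + 1) words.length) = none := by
      apply List.find?_eq_none.mpr
      intro e he
      rw [List.mem_range'_1] at he
      intro hc
      rw [MEb_iff] at hc
      omega
    rw [hfirst, Option.none_or]
    rw [List.range'_eq_map_range, List.find?_map, Option.map_map]
    have hpred : ∀ i ∈ List.range (tokens.length - words.length + 1),
        ((fun e => MEb tokens words (e + 1) words.length) ∘ fun x => words.length - 1 + x) i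
          = (swP tokens words ∘ fun k : Nat => (k : Int)) i := by
      intro i _
      apply pv_bool_eq_of_iff
      simp only [Function.comp]
      rw [show words.length - 1 + i + 1 = i + words.length from by omega]
      exact (swP_iff_MEb tokens words hm i).symm
    rw [pv_find?_congr _ _ _ hpred]
    cases hfind : (List.range (tokens.length - words.length + 1)).find?
        (swP tokens words ∘ fun k : Nat => (k : Int)) with
    | none => rfl
    | some i =>
      simp only [Option.map_some, Function.comp]
      congr 1
      push_cast [show (1 : Int) ≤ (words.length : Int) from by omega]
      omega
  · -- the phrase is longer than the token list: both sides find nothing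
    rw [PySem.List.pyRange_one_eq_nil (by omega)]
    have hnone : (List.range' 0 tokens.length).find?
        (fun e => MEb tokens words (e + 1) words.length) = none := by
      apply List.find?_eq_none.mpr
      intro e he
      rw [List.mem_range'_1] at he
      intro hc
      rw [MEb_iff] at hc
      omega
    rw [hnone]
    rfl

-- ===== VERDICT (by name: the statement is the Claim_ definition above) =====
theorem surrounding_words_spec : Claim_equal_surrounding_words := by
  intro phrase tokens window _
  unfold Spec_surrounding_words surrounding_words surrounding_words_alt
  generalize PySem.Str.split₀ phrase = words
  by_cases hm : words.length = 0
  · -- empty phrase: A matches immediately at i = 0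
    rw [if_pos hm]
    have hwnil : words = [] := List.length_eq_zero_iff.mp hm
    subst hwnil
    have hr : PySem.List.pyRange 0 ((tokens.length : Int) - ((0 : Nat) : Int) + 1)
        = 0 :: PySem.List.pyRange 1 ((tokens.length : Int) + 1) := by
      have := PySem.List.pyRange_one_cons (a := 0) (b := (tokens.length : Int) + 1) (by positivity)
      simpa using this
    simp only [List.length_nil] at hr ⊢
    rw [hr]
    have h0 : (PySem.List.slice tokens (some 0) (some (0 + ((0:Nat) : Int))) == ([] : List String))
        = true := by
      have hs := PySem.List.slice_natCast_add tokens 0 0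
      simp at hs ⊢
      simpa using hs
    rw [swLoopA, if_pos (by simpa using h0)]
    simp [swTail]
  · rw [if_neg hm]
    rw [swLoopA_eq_find, findA_eq_run tokens words hm]
    cases hrun : swRunB (swMasks words) (1 <<< (words.length - 1)) words.length tokens 0 0 with
    | none => rfl
    | some i => rfl
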